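-- pv_equiv track=rewrite | github.com/apwic/leetcode | 1679-shortest-subarray-to-be-removed-to-make-array-sorted/1679-shortest-subarray-to-be-removed-to-make-array-sorted.py | findLengthOfShortestSubarray
-- ===== SOURCE A (Python) =====
-- from typing import List
--
-- def findLengthOfShortestSubarray(arr: List[int]) -> int:
--     n = len(arr)
--     r = n - 1
--     while r > 0 and arr[r] >= arr[r-1]:
--         r -= 1
--
--     ans = r
--     l = 0
--
--     while l < r and (l == 0 or arr[l-1] <= arr[l]):
--         while r < n and arr[l] > arr[r]:
--             r += 1
--
--         ans = min(ans, r-l-1)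
--         l += 1
--
--     return ans
-- ===== SOURCE B (Python) =====
-- from typing import List
--
-- def _bisect_ge(arr, x, lo, hi):
--     # first index k in [lo, hi) with arr[k] >= x, else hi (arr nondecreasing on [lo, hi))
--     while lo < hi:
--         mid = (lo + hi) // 2
--         if arr[mid] < x:
--             lo = mid + 1
--         else:
--             hi = mid
--     return lo
--
-- def findLengthOfShortestSubarray(arr: List[int]) -> int:
--     n = len(arr)
--     if n == 0:
--         return 0
--     p = 0
--     while p + 1 < n and arr[p] <= arr[p + 1]:
--         p += 1
--     if p == n - 1:
--         return 0
--     j = n - 1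
--     while j > 0 and arr[j - 1] <= arr[j]:
--         j -= 1
--     ans = j
--     for i in range(p + 1):
--         k = _bisect_ge(arr, arr[i], j, n)
--         ans = min(ans, k - i - 1)
--     return ans
-- ===== Notes on version B (the rewrite author's own statement) =====
-- stated objective: alternative
-- what changed: Replaces A's single non-resetting two-pointer sweep by two independent boundary scans (longest sorted prefix end p, sorted suffix start j) followed by a hand-written binary search over the sorted suffix for each prefix index, instead of advancing a shared forward pointer.
-- intended difference: On the empty list A returns -1 (the leftover r = n-1 = -1), which is not a valid removal length; B returns 0, the intended answer since an empty array is already sorted. — e.g. on findLengthOfShortestSubarray([]): A returns -1, B returns 0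
import Mathlib
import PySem

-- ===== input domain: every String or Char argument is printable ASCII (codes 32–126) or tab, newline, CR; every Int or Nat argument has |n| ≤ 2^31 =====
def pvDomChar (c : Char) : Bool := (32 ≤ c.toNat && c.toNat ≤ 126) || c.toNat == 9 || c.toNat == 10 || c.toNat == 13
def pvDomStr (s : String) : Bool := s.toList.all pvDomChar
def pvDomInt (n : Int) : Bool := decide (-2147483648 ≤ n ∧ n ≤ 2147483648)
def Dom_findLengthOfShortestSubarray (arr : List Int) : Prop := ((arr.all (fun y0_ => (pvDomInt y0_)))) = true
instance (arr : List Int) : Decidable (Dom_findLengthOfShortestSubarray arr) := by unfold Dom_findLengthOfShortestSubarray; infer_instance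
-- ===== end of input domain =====

-- B replaces A's non-resetting two-pointer sweep by two boundary scans plus a binary
-- search over the sorted suffix (alternative algorithm, not claimed faster); on the
-- empty list A returns -1 (leftover r = n-1), B returns the intended 0 (see D_ below).

-- ===== PORT A =====
-- arr[i] for an Int index; every access A performs is in range, where pyGetD is exact
def pvAGet (arr : List Int) (i : Int) : Int := PySem.List.pyGetD arr i 0

-- while r > 0 and arr[r] >= arr[r-1]: r -= 1
-- (fuel is a totality guard only; the call site passes enough for every input)
def pvAFirst (arr : List Int) : Nat → Int → Int
  | 0, r => r
  | fuel + 1, r =>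
    if r > 0 ∧ pvAGet arr r ≥ pvAGet arr (r - 1) then pvAFirst arr fuel (r - 1) else r

-- while r < n and arr[l] > arr[r]: r += 1
def pvAInner (arr : List Int) (n l : Int) : Nat → Int → Int
  | 0, r => r
  | fuel + 1, r =>
    if r < n ∧ pvAGet arr l > pvAGet arr r then pvAInner arr n l fuel (r + 1) else r

-- while l < r and (l == 0 or arr[l-1] <= arr[l]): …
def pvAOuter (arr : List Int) (n : Int) : Nat → Int → Int → Int → Int
  | 0, _, _, ans => ans
  | fuel + 1, l, r, ans =>
    if l < r ∧ (l = 0 ∨ pvAGet arr (l - 1) ≤ pvAGet arr l) then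
      let r' := pvAInner arr n l (n.toNat + 1) r
      pvAOuter arr n fuel (l + 1) r' (min ans (r' - l - 1))
    else ans

def findLengthOfShortestSubarray (arr : List Int) : Int :=
  let n : Int := arr.length
  let r := pvAFirst arr arr.length (n - 1)
  pvAOuter arr n (arr.length + 1) 0 r r

-- ===== PORT B =====
-- arr[i] for a Nat index; every access B performs is in range, where getD is exact
def pvBGet (arr : List Int) (i : Nat) : Int := arr.getD i 0

-- _bisect_ge: while lo < hi: mid = (lo+hi)//2; …  (fuel is a totality guard only)
def pvBisectGe (arr : List Int) (x : Int) : Nat → Nat → Nat → Nat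
  | 0, lo, _ => lo
  | fuel + 1, lo, hi =>
    if lo < hi then
      let mid := (lo + hi) / 2
      if pvBGet arr mid < x then pvBisectGe arr x fuel (mid + 1) hi
      else pvBisectGe arr x fuel lo mid
    else lo

-- while p + 1 < n and arr[p] <= arr[p+1]: p += 1
def pvBPref (arr : List Int) : Nat → Nat → Nat
  | 0, p => p
  | fuel + 1, p =>
    if p + 1 < arr.length ∧ pvBGet arr p ≤ pvBGet arr (p + 1) then pvBPref arr fuel (p + 1) else p

-- while j > 0 and arr[j-1] <= arr[j]: j -= 1  (structural descent on j)
def pvBSuff (arr : List Int) : Nat → Nat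
  | 0 => 0
  | j + 1 => if pvBGet arr j ≤ pvBGet arr (j + 1) then pvBSuff arr j else j + 1

-- for i in range(p + 1): k = _bisect_ge(arr, arr[i], j, n); ans = min(ans, k - i - 1)
def pvBLoop (arr : List Int) (j p : Nat) : Nat → Nat → Int → Int
  | 0, _, ans => ans
  | fuel + 1, i, ans =>
    if i < p + 1 then
      let k := pvBisectGe arr (pvBGet arr i) (arr.length + 1) j arr.length
      pvBLoop arr j p fuel (i + 1) (min ans ((k : Int) - (i : Int) - 1))
    else ans

def findLengthOfShortestSubarray_alt (arr : List Int) : Int :=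
  if arr.length = 0 then 0
  else
    let p := pvBPref arr arr.length 0
    if p = arr.length - 1 then 0
    else
      let j := pvBSuff arr (arr.length - 1)
      pvBLoop arr j p (p + 2) 0 (j : Int)

-- ===== PRECONDITION & SPEC =====
-- On the empty list A returns -1 (the leftover r = n-1), which is not a valid removal
-- length; B returns 0, the intended answer since an empty array is already sorted.
def D_findLengthOfShortestSubarray (arr : List Int) : Prop := arr = []
instance (arr : List Int) : Decidable (D_findLengthOfShortestSubarray arr) := by unfold D_findLengthOfShortestSubarray; infer_instance

def Spec_findLengthOfShortestSubarray (arr : List Int) (out : Int) : Prop := ¬ D_findLengthOfShortestSubarray arr → out = findLengthOfShortestSubarray_alt arr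
instance (arr : List Int) (out : Int) : Decidable (Spec_findLengthOfShortestSubarray arr out) := by unfold Spec_findLengthOfShortestSubarray; infer_instance

def pvDiffWitness_findLengthOfShortestSubarray : List Int := ([])
def pvDiffWitnessOut_findLengthOfShortestSubarray : Int × Int := (-1, 0)

-- ===== CLAIM (what is proved, stated in full; the proofs are below) =====
def Claim_unchanged_findLengthOfShortestSubarray : Prop := ∀ (arr : List Int), Dom_findLengthOfShortestSubarray arr → Spec_findLengthOfShortestSubarray arr (findLengthOfShortestSubarray arr)
def Claim_changed_findLengthOfShortestSubarray : Prop := Dom_findLengthOfShortestSubarray (pvDiffWitness_findLengthOfShortestSubarray) ∧ D_findLengthOfShortestSubarray (pvDiffWitness_findLengthOfShortestSubarray) ∧ findLengthOfShortestSubarray (pvDiffWitness_findLengthOfShortestSubarray) = pvDiffWitnessOut_findLengthOfShortestSubarray.1 ∧ findLengthOfShortestSubarray_alt (pvDiffWitness_findLengthOfShortestSubarray) = pvDiffWitnessOut_findLengthOfShortestSubarray.2 ∧ pvDiffWitnessOut_findLengthOfShortestSubarray.1 ≠ pvDiffWitnessOut_findLengthOfShortestSubarray.2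
def Claim_exact_findLengthOfShortestSubarray : Prop := ∀ (arr : List Int), Dom_findLengthOfShortestSubarray arr → D_findLengthOfShortestSubarray arr → findLengthOfShortestSubarray arr ≠ findLengthOfShortestSubarray_alt arr

-- ===== LEMMAS AND PROOFS =====

-- the two Int/Nat index helpers agree on natural indices
theorem pvGet_cast (arr : List Int) (i : Nat) : pvAGet arr (i : Int) = pvBGet arr i := by
  simp [pvAGet, pvBGet]

-- A's first loop is B's suffix scan (same descent, conditions mirrored)
theorem pvAFirst_eq_bSuff (arr : List Int) :
    ∀ (r fuel : Nat), r ≤ fuel → pvAFirst arr fuel (r : Int) = (pvBSuff arr r : Int) := by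
  intro r
  induction r with
  | zero =>
    intro fuel _
    cases fuel with
    | zero => rfl
    | succ f => simp [pvAFirst, pvBSuff]
  | succ r ih =>
    intro fuel hf
    cases fuel with
    | zero => omega
    | succ f =>
      have hc : (((r + 1 : Nat) : Int) - 1) = ((r : Nat) : Int) := by push_cast; ring
      simp only [pvAFirst, pvBSuff, hc, pvGet_cast]
      by_cases hle : pvBGet arr r ≤ pvBGet arr (r + 1)
      · rw [if_pos ⟨by positivity, hle⟩, if_pos hle]
        exact ih f (by omega)
      · rw [if_neg (fun hh => hle hh.2), if_neg hle]

theorem pvBSuff_le (arr : List Int) (j : Nat) : pvBSuff arr j ≤ j := by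
  induction j with
  | zero => simp [pvBSuff]
  | succ j ih =>
    simp only [pvBSuff]
    split_ifs with h
    · omega
    · omega

theorem pvBSuff_sorted (arr : List Int) :
    ∀ (j : Nat), ∀ t, pvBSuff arr j ≤ t → t < j → pvBGet arr t ≤ pvBGet arr (t + 1) := by
  intro j
  induction j with
  | zero => intro t h1 h2; omega
  | succ j ih =>
    intro t h1 h2
    simp only [pvBSuff] at h1
    split_ifs at h1 with h
    · by_cases ht : t < j
      · exact ih t h1 ht
      · have : t = j := by omega
        subst this
        exact h
    · omega

theorem pvBSuff_of_sorted (arr : List Int) :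
    ∀ (j : Nat), (∀ t, t + 1 ≤ j → pvBGet arr t ≤ pvBGet arr (t + 1)) → pvBSuff arr j = 0 := by
  intro j
  induction j with
  | zero => intro _; rfl
  | succ j ih =>
    intro h
    simp only [pvBSuff]
    rw [if_pos (h j (le_refl _))]
    exact ih (fun t ht => h t (by omega))

theorem pvBPref_sorted (arr : List Int) :
    ∀ (fuel p : Nat), ∀ t, p ≤ t → t < pvBPref arr fuel p → pvBGet arr t ≤ pvBGet arr (t + 1) := by
  intro fuel
  induction fuel with
  | zero => intro p t h1 h2; simp only [pvBPref] at h2; omega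
  | succ fuel ih =>
    intro p t h1 h2
    simp only [pvBPref] at h2 ⊢
    split_ifs at h2 with h
    · by_cases ht : p + 1 ≤ t
      · exact ih (p + 1) t ht h2
      · have : t = p := by omega
        subst this
        exact h.2
    · omega

theorem pvBPref_stop (arr : List Int) :
    ∀ (fuel p : Nat), arr.length - p ≤ fuel →
      pvBPref arr fuel p + 1 ≥ arr.length ∨
        ¬ pvBGet arr (pvBPref arr fuel p) ≤ pvBGet arr (pvBPref arr fuel p + 1) := by
  intro fuel
  induction fuel with
  | zero => intro p hf; simp only [pvBPref]; omega
  | succ fuel ih =>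
    intro p hf
    simp only [pvBPref]
    split_ifs with h
    · exact ih (p + 1) (by omega)
    · by_cases h0 : p + 1 ≥ arr.length
      · exact Or.inl h0
      · exact Or.inr (fun hle => h ⟨by omega, hle⟩)

theorem pvBPref_lt (arr : List Int) :
    ∀ (fuel p : Nat), p < arr.length → pvBPref arr fuel p < arr.length := by
  intro fuel
  induction fuel with
  | zero => intro p h; simpa [pvBPref] using h
  | succ fuel ih =>
    intro p h
    simp only [pvBPref]
    split_ifs with hc
    · exact ih (p + 1) hc.1
    · exact h

-- adjacent-sorted implies pairwise-sorted on a range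
def pvSortedOn (arr : List Int) (lo hi : Nat) : Prop :=
  ∀ s t, lo ≤ s → s ≤ t → t < hi → pvBGet arr s ≤ pvBGet arr t

theorem pvSortedOn_of_adj (arr : List Int) (lo hi : Nat)
    (h : ∀ t, lo ≤ t → t + 1 < hi → pvBGet arr t ≤ pvBGet arr (t + 1)) : pvSortedOn arr lo hi := by
  intro s t hs hst hth
  induction t with
  | zero =>
    have : s = 0 := by omega
    subst this; exact le_refl _
  | succ t ih =>
    by_cases hst' : s = t + 1
    · subst hst'; exact le_refl _
    · exact le_trans (ih (by omega) (by omega)) (h t (by omega) hth)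

theorem pvBisect_bounds (arr : List Int) (x : Int) :
    ∀ (fuel lo hi : Nat), hi - lo ≤ fuel → lo ≤ hi →
      lo ≤ pvBisectGe arr x fuel lo hi ∧ pvBisectGe arr x fuel lo hi ≤ hi := by
  intro fuel
  induction fuel with
  | zero => intro lo hi hf h; simp only [pvBisectGe]; omega
  | succ fuel ih =>
    intro lo hi hf h
    simp only [pvBisectGe]
    split_ifs with hc hlt
    · have := ih ((lo + hi) / 2 + 1) hi (by omega) (by omega)
      omega
    · have := ih lo ((lo + hi) / 2) (by omega) (by omega)
      omega
    · omega

theorem pvBisect_lt (arr : List Int) (x : Int) :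
    ∀ (fuel lo hi : Nat), hi - lo ≤ fuel → pvSortedOn arr lo hi →
      ∀ t, lo ≤ t → t < pvBisectGe arr x fuel lo hi → pvBGet arr t < x := by
  intro fuel
  induction fuel with
  | zero => intro lo hi hf hs t h1 h2; simp only [pvBisectGe] at h2; omega
  | succ fuel ih =>
    intro lo hi hf hs t h1 h2
    simp only [pvBisectGe] at h2
    split_ifs at h2 with hc hlt
    · by_cases ht : (lo + hi) / 2 + 1 ≤ t
      · exact ih ((lo + hi) / 2 + 1) hi (by omega)
          (fun s t hs' hst hth => hs s t (by omega) hst hth) t ht h2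
      · calc pvBGet arr t ≤ pvBGet arr ((lo + hi) / 2) := hs t _ h1 (by omega) (by omega)
          _ < x := hlt
    · exact ih lo ((lo + hi) / 2) (by omega)
        (fun s t hs' hst hth => hs s t hs' hst (by omega)) t h1 h2
    · omega

theorem pvBisect_ge (arr : List Int) (x : Int) :
    ∀ (fuel lo hi : Nat), hi - lo ≤ fuel → pvBisectGe arr x fuel lo hi < hi →
      x ≤ pvBGet arr (pvBisectGe arr x fuel lo hi) := by
  intro fuel
  induction fuel with
  | zero => intro lo hi hf h; simp only [pvBisectGe] at h; omega
  | succ fuel ih =>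
    intro lo hi hf h
    simp only [pvBisectGe] at h ⊢
    split_ifs at h ⊢ with hc hlt
    · exact ih ((lo + hi) / 2 + 1) hi (by omega) h
    · by_cases hlt2 : pvBisectGe arr x fuel lo ((lo + hi) / 2) < (lo + hi) / 2
      · exact ih lo ((lo + hi) / 2) (by omega) hlt2
      · have hb := pvBisect_bounds arr x fuel lo ((lo + hi) / 2) (by omega) (by omega)
        have he : pvBisectGe arr x fuel lo ((lo + hi) / 2) = (lo + hi) / 2 := by omega
        rw [he]
        omega
    · omega

theorem pvBisect_mono (arr : List Int) (x x' : Int) (fuel lo hi : Nat)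
    (hf : hi - lo ≤ fuel) (hlo : lo ≤ hi) (hs : pvSortedOn arr lo hi) (hxx : x ≤ x') :
    pvBisectGe arr x fuel lo hi ≤ pvBisectGe arr x' fuel lo hi := by
  by_contra hcon
  have hcon' : pvBisectGe arr x' fuel lo hi < pvBisectGe arr x fuel lo hi := by omega
  have hb := pvBisect_bounds arr x fuel lo hi hf hlo
  have hb' := pvBisect_bounds arr x' fuel lo hi hf hlo
  have h1 : pvBGet arr (pvBisectGe arr x' fuel lo hi) < x :=
    pvBisect_lt arr x fuel lo hi hf hs _ hb'.1 hcon'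
  have h2 : x' ≤ pvBGet arr (pvBisectGe arr x' fuel lo hi) :=
    pvBisect_ge arr x' fuel lo hi hf (by omega)
  omega

-- A's inner loop, started at the binary-search answer, stops immediately
theorem pvAInner_at_kb (arr : List Int) (l j : Nat) (hjn : j ≤ arr.length) :
    ∀ fuel, pvAInner arr (arr.length : Int) (l : Int) fuel
        ((pvBisectGe arr (pvBGet arr l) (arr.length + 1) j arr.length : Nat) : Int)
      = (pvBisectGe arr (pvBGet arr l) (arr.length + 1) j arr.length : Int) := by
  intro fuel
  cases fuel with
  | zero => rfl
  | succ fuel =>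
    simp only [pvAInner]
    rw [if_neg]
    intro hh
    rcases hh with ⟨h1, h2⟩
    have hlt : pvBisectGe arr (pvBGet arr l) (arr.length + 1) j arr.length < arr.length := by
      exact_mod_cast h1
    have := pvBisect_ge arr (pvBGet arr l) (arr.length + 1) j arr.length (by omega) hlt
    rw [pvGet_cast, pvGet_cast] at h2
    omega

-- A's inner loop, started anywhere between j and the binary-search answer, lands on it
theorem pvAInner_eq_bisect (arr : List Int) (l j : Nat)
    (hs : pvSortedOn arr j arr.length) (hjn : j ≤ arr.length) :
    ∀ (fuel r0 : Nat), pvBisectGe arr (pvBGet arr l) (arr.length + 1) j arr.length - r0 ≤ fuel →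
      j ≤ r0 → r0 ≤ pvBisectGe arr (pvBGet arr l) (arr.length + 1) j arr.length →
      pvAInner arr (arr.length : Int) (l : Int) fuel (r0 : Int)
        = (pvBisectGe arr (pvBGet arr l) (arr.length + 1) j arr.length : Int) := by
  intro fuel
  induction fuel with
  | zero =>
    intro r0 h0 hj hr
    have : r0 = pvBisectGe arr (pvBGet arr l) (arr.length + 1) j arr.length := by omega
    subst this
    rfl
  | succ fuel ih =>
    intro r0 h0 hj hr
    by_cases he : r0 = pvBisectGe arr (pvBGet arr l) (arr.length + 1) j arr.length
    · rw [he]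
      exact pvAInner_at_kb arr l j hjn (fuel + 1)
    · have hlt : r0 < pvBisectGe arr (pvBGet arr l) (arr.length + 1) j arr.length := by omega
      have hb := pvBisect_bounds arr (pvBGet arr l) (arr.length + 1) j arr.length (by omega) hjn
      have harr : pvBGet arr r0 < pvBGet arr l :=
        pvBisect_lt arr (pvBGet arr l) (arr.length + 1) j arr.length (by omega) hs r0 hj hlt
      simp only [pvAInner]
      rw [if_pos ⟨by exact_mod_cast (by omega : r0 < arr.length), by rw [pvGet_cast, pvGet_cast]; omega⟩]
      have hc : ((r0 : Int) + 1) = ((r0 + 1 : Nat) : Int) := by push_cast; ring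
      rw [hc]
      exact ih (r0 + 1) (by omega) (by omega) (by omega)

-- A's outer loop equals B's for-loop
theorem pvAOuter_eq_bLoop (arr : List Int) (p j : Nat)
    (hs : pvSortedOn arr j arr.length) (hjn : j ≤ arr.length) (hpj : p + 1 ≤ j)
    (hpn : p + 1 < arr.length)
    (hadj : ∀ t, t < p → pvBGet arr t ≤ pvBGet arr (t + 1))
    (hstop : ¬ pvBGet arr p ≤ pvBGet arr (p + 1)) :
    ∀ (d fA fB i r0 : Nat) (ans : Int), p + 1 - i ≤ d → p + 1 - i ≤ fA → p + 1 - i ≤ fB →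
      i ≤ p + 1 →
      (i ≤ p → j ≤ r0 ∧ r0 ≤ pvBisectGe arr (pvBGet arr i) (arr.length + 1) j arr.length) →
      pvAOuter arr (arr.length : Int) fA (i : Int) (r0 : Int) ans = pvBLoop arr j p fB i ans := by
  have hAexit : ∀ (fA : Nat) (r0 ans : Int),
      pvAOuter arr (arr.length : Int) fA ((p + 1 : Nat) : Int) r0 ans = ans := by
    intro fA r0 ans
    cases fA with
    | zero => rfl
    | succ fA =>
      simp only [pvAOuter]
      rw [if_neg]
      intro hh
      rcases hh.2 with h1 | h1
      · omega
      · have hc : (((p + 1 : Nat) : Int) - 1) = ((p : Nat) : Int) := by push_cast; ring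
        rw [hc, pvGet_cast, pvGet_cast] at h1
        exact hstop h1
  have hBexit : ∀ (fB : Nat) (ans : Int), pvBLoop arr j p fB (p + 1) ans = ans := by
    intro fB ans
    cases fB with
    | zero => rfl
    | succ fB => simp only [pvBLoop]; rw [if_neg (by omega)]
  intro d
  induction d with
  | zero =>
    intro fA fB i r0 ans h0 hfa hfb hi hinv
    have hie : i = p + 1 := by omega
    subst hie
    rw [hAexit, hBexit]
  | succ d ih =>
    intro fA fB i r0 ans h0 hfa hfb hi hinv
    by_cases hie : i = p + 1
    · subst hie
      rw [hAexit, hBexit]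
    · have hip : i ≤ p := by omega
      rcases hinv hip with ⟨hjr, hrk⟩
      have hb := pvBisect_bounds arr (pvBGet arr i) (arr.length + 1) j arr.length (by omega) hjn
      cases fA with
      | zero => omega
      | succ fA =>
        cases fB with
        | zero => omega
        | succ fB =>
          have hguard : ((i : Nat) : Int) < ((r0 : Nat) : Int) ∧
              (((i : Nat) : Int) = 0 ∨ pvAGet arr (((i : Nat) : Int) - 1) ≤ pvAGet arr ((i : Nat) : Int)) := by
            refine ⟨by exact_mod_cast (by omega : i < r0), ?_⟩
            by_cases hi0 : i = 0
            · exact Or.inl (by exact_mod_cast hi0)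
            · refine Or.inr ?_
              have hc : ((i : Nat) : Int) - 1 = ((i - 1 : Nat) : Int) := by omega
              rw [hc, pvGet_cast, pvGet_cast]
              have := hadj (i - 1) (by omega)
              have hii : i - 1 + 1 = i := by omega
              rwa [hii] at this
          simp only [pvAOuter, pvBLoop]
          rw [if_pos hguard, if_pos (by omega)]
          have htn : ((arr.length : Int).toNat + 1) = arr.length + 1 := by
            simp
          have hinner : pvAInner arr (arr.length : Int) ((i : Nat) : Int)
              ((arr.length : Int).toNat + 1) ((r0 : Nat) : Int)
              = ((pvBisectGe arr (pvBGet arr i) (arr.length + 1) j arr.length : Nat) : Int) := by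
            rw [htn]
            exact pvAInner_eq_bisect arr i j hs hjn (arr.length + 1) r0 (by omega) hjr hrk
          rw [hinner]
          have hc1 : ((i : Nat) : Int) + 1 = ((i + 1 : Nat) : Int) := by push_cast; ring
          rw [hc1]
          apply ih fA fB (i + 1) (pvBisectGe arr (pvBGet arr i) (arr.length + 1) j arr.length)
            _ (by omega) (by omega) (by omega) (by omega)
          intro hip1
          refine ⟨hb.1, ?_⟩
          exact pvBisect_mono arr (pvBGet arr i) (pvBGet arr (i + 1)) (arr.length + 1) j
            arr.length (by omega) hjn hs (hadj i (by omega))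

-- ===== VERDICT (by name: the statement is the Claim_ definition above) =====
theorem findLengthOfShortestSubarray_spec : Claim_unchanged_findLengthOfShortestSubarray := by
  intro arr _ hD
  have hne : arr ≠ [] := hD
  have h1 : 1 ≤ arr.length := by
    cases arr with
    | nil => exact absurd rfl hne
    | cons a l => simp
  obtain ⟨p, hp⟩ : ∃ p, pvBPref arr arr.length 0 = p := ⟨_, rfl⟩
  obtain ⟨j, hj⟩ : ∃ j, pvBSuff arr (arr.length - 1) = j := ⟨_, rfl⟩
  have hjle : j ≤ arr.length - 1 := hj ▸ pvBSuff_le arr (arr.length - 1)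
  have hpadj : ∀ t, t < p → pvBGet arr t ≤ pvBGet arr (t + 1) :=
    fun t ht => pvBPref_sorted arr arr.length 0 t (by omega) (hp ▸ ht)
  have hsadj : ∀ t, j ≤ t → t + 1 < arr.length → pvBGet arr t ≤ pvBGet arr (t + 1) :=
    fun t h1t h2t => pvBSuff_sorted arr (arr.length - 1) t (hj ▸ h1t) (by omega)
  have hs : pvSortedOn arr j arr.length := pvSortedOn_of_adj arr j arr.length hsadj
  have hfirst : pvAFirst arr arr.length ((arr.length : Int) - 1) = (j : Int) := by
    have hc : ((arr.length : Int) - 1) = ((arr.length - 1 : Nat) : Int) := by omega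
    rw [hc, pvAFirst_eq_bSuff arr (arr.length - 1) arr.length (by omega), hj]
  by_cases hsorted : p = arr.length - 1
  · -- whole array already non-decreasing: both return 0
    have hall : ∀ t, t + 1 ≤ arr.length - 1 → pvBGet arr t ≤ pvBGet arr (t + 1) :=
      fun t ht => hpadj t (by omega)
    have hj0 : j = 0 := by
      rw [← hj]
      exact pvBSuff_of_sorted arr (arr.length - 1) hall
    have hA : findLengthOfShortestSubarray arr = 0 := by
      simp only [findLengthOfShortestSubarray]
      rw [hfirst, hj0]
      simp only [Nat.cast_zero, pvAOuter]
      rw [if_neg]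
      intro hh
      have := hh.1
      norm_num at this
    have hB : findLengthOfShortestSubarray_alt arr = 0 := by
      simp only [findLengthOfShortestSubarray_alt]
      rw [hp, if_neg (by omega), if_pos hsorted]
    rw [hA, hB]
  · -- unsorted case
    have hplt : p < arr.length := hp ▸ pvBPref_lt arr arr.length 0 (by omega)
    have hpn : p + 1 < arr.length := by omega
    have hstop : ¬ pvBGet arr p ≤ pvBGet arr (p + 1) := by
      rcases pvBPref_stop arr arr.length 0 (by omega) with h | h
      · rw [hp] at h; omega
      · rwa [hp] at h
    have hpj : p + 1 ≤ j := by
      by_contra hcon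
      exact hstop (hsadj p (by omega) hpn)
    have hb0 := pvBisect_bounds arr (pvBGet arr 0) (arr.length + 1) j arr.length (by omega) (by omega)
    have hA : findLengthOfShortestSubarray arr = pvBLoop arr j p (p + 2) 0 (j : Int) := by
      simp only [findLengthOfShortestSubarray]
      rw [hfirst]
      have h00 : (0 : Int) = ((0 : Nat) : Int) := rfl
      rw [h00]
      exact pvAOuter_eq_bLoop arr p j hs (by omega) hpj hpn hpadj hstop
        (p + 1) (arr.length + 1) (p + 2) 0 j (j : Int) (by omega) (by omega) (by omega) (by omega)
        (fun _ => ⟨le_refl _, hb0.1⟩)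
    have hB : findLengthOfShortestSubarray_alt arr = pvBLoop arr j p (p + 2) 0 (j : Int) := by
      simp only [findLengthOfShortestSubarray_alt]
      rw [hp, hj, if_neg (by omega), if_neg hsorted]
    rw [hA, hB]

theorem findLengthOfShortestSubarray_changed : Claim_changed_findLengthOfShortestSubarray := by
  unfold Claim_changed_findLengthOfShortestSubarray; decide

theorem findLengthOfShortestSubarray_tight : Claim_exact_findLengthOfShortestSubarray := by
  intro arr _ hD
  subst hD
  decide
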